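-- pv_equiv track=rewrite | github.com/heggria/agent-usage-atlas | src/agent_usage_atlas/aggregation/tool_safety.py | _detect_error_cascade
-- ===== SOURCE A (Python) =====
-- def _count_consecutive_runs(sequence: list[str], predicate, min_run: int) -> int:
--     """Count how many times *predicate* holds for *min_run*+ consecutive items."""
--     violations = 0
--     run = 0
--     for item in sequence:
--         if predicate(item):
--             run += 1
--             if run == min_run:
--                 violations += 1
--         else:
--             run = 0
--     return violations
--
-- def _detect_error_cascade(sequences: dict) -> tuple[int, int]:
--     """3+ consecutive Bash calls (proxy for repeated failing commands)."""
--     total = 0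
--     sessions = 0
--     for seq in sequences.values():
--         hits = _count_consecutive_runs(seq, lambda t: t == "Bash", 3)
--         if hits:
--             total += hits
--             sessions += 1
--     return total, sessions
-- ===== SOURCE B (Python) =====
-- def _cascade_hits(seq):
--     """Number of maximal runs of consecutive "Bash" items with length >= 3,
--     found by skipping over each whole run at once."""
--     hits = 0
--     i = 0
--     n = len(seq)
--     while i < n:
--         if seq[i] != "Bash":
--             i += 1
--         else:
--             j = i
--             while j < n and seq[j] == "Bash":
--                 j += 1
--             if j - i >= 3:
--                 hits += 1
--             i = j
--     return hits
--
-- def _detect_error_cascade(sequences: dict) -> tuple[int, int]: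
--     """3+ consecutive Bash calls (proxy for repeated failing commands)."""
--     hits_list = [_cascade_hits(seq) for seq in sequences.values()]
--     total = sum(hits_list)
--     sessions = sum(1 for h in hits_list if h)
--     return total, sessions
-- ===== Notes on version B (the rewrite author's own statement) =====
-- stated objective: alternative
-- what changed: Replaces the incremental run-counter that fires the moment run==3 by a run-decomposition scan that skips each maximal Bash run at once and counts those of length >= 3, and derives (total, sessions) from a per-sequence hits list instead of a gated accumulator loop.
import Mathlib
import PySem

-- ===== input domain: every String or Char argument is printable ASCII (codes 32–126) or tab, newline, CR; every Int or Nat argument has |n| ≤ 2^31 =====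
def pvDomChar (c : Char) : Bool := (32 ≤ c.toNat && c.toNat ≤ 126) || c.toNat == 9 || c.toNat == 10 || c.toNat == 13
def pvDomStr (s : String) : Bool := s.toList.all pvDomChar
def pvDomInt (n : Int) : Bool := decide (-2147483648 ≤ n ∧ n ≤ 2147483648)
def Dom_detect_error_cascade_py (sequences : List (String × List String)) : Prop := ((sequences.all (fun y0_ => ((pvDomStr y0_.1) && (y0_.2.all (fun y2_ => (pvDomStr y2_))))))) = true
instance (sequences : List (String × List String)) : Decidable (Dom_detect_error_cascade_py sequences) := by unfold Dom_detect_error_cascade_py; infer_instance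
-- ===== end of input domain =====

-- B is an alternative, not faster: it counts maximal Bash runs of length ≥ 3 by
-- skipping whole runs, instead of A's incremental run counter with a ==3 trigger.

-- ===== PORT A =====
-- literal port of _count_consecutive_runs: fold carrying (violations, run)
def count_consecutive_runs (sequence : List String) (predicate : String → Bool) (min_run : Int) : Int :=
  (sequence.foldl (fun (st : Int × Int) item =>
      if predicate item then
        if st.2 + 1 == min_run then (st.1 + 1, st.2 + 1) else (st.1, st.2 + 1)
      else (st.1, 0)) (0, 0)).1

def detect_error_cascade_py (sequences : List (String × List String)) : Int × Int :=
  (sequences.map Prod.snd).foldl (fun (acc : Int × Int) seq =>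
    let hits := count_consecutive_runs seq (fun t => t == "Bash") 3
    if hits ≠ 0 then (acc.1 + hits, acc.2 + 1) else acc) (0, 0)

-- ===== PORT B =====
-- length of the leading run of "Bash" (the inner `while j < n and seq[j]=="Bash"` scan)
def pvRunLen : List String → Nat
  | [] => 0
  | t :: rest => if t == "Bash" then pvRunLen rest + 1 else 0

theorem pvRunLen_head_bash (xs : List String) : pvRunLen ("Bash" :: xs) = pvRunLen xs + 1 := by
  simp [pvRunLen]

-- the outer while loop of _cascade_hits: advance by one on a non-Bash item,
-- otherwise skip the whole maximal Bash run and count it if its length ≥ 3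
def pvCascadeHits : List String → Int
  | [] => 0
  | x :: xs =>
    if x == "Bash" then
      (if pvRunLen (x :: xs) ≥ 3 then (1 : Int) else 0)
        + pvCascadeHits ((x :: xs).drop (pvRunLen (x :: xs)))
    else
      pvCascadeHits xs
termination_by l => l.length
decreasing_by
  · rename_i h
    have hx : x = "Bash" := by simpa using h
    subst hx
    simp only [List.length_drop, List.length_cons, pvRunLen_head_bash]
    omega
  · simp

def detect_error_cascade_py_alt (sequences : List (String × List String)) : Int × Int :=
  let hitsList := (sequences.map Prod.snd).map pvCascadeHits
  (hitsList.foldl (· + ·) 0, ((hitsList.filter (fun h => h ≠ 0)).length : Int))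

-- ===== PRECONDITION & SPEC =====
def Spec_detect_error_cascade_py (sequences : List (String × List String)) (out : Int × Int) : Prop := out = detect_error_cascade_py_alt sequences
instance (sequences : List (String × List String)) (out : Int × Int) : Decidable (Spec_detect_error_cascade_py sequences out) := by unfold Spec_detect_error_cascade_py; infer_instance

-- ===== CLAIM (what is proved, stated in full; the proofs are below) =====
def Claim_equal_detect_error_cascade_py : Prop := ∀ (sequences : List (String × List String)), Dom_detect_error_cascade_py sequences → Spec_detect_error_cascade_py sequences (detect_error_cascade_py sequences)

-- ===== LEMMAS AND PROOFS =====

-- violations contributed by A's inner loop from current run counter r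
def pvFA : List String → Int → Int
  | [], _ => 0
  | x :: xs, r =>
    if x == "Bash" then (if r + 1 == 3 then 1 else 0) + pvFA xs (r + 1)
    else pvFA xs 0

theorem pvFold_eq_FA (seq : List String) : ∀ (v r : Int),
    (seq.foldl (fun (st : Int × Int) item =>
      if (item == "Bash") then
        if st.2 + 1 == (3 : Int) then (st.1 + 1, st.2 + 1) else (st.1, st.2 + 1)
      else (st.1, 0)) (v, r)).1 = v + pvFA seq r := by
  induction seq with
  | nil => intro v r; simp [pvFA]
  | cons x xs ih =>
    intro v r
    simp only [List.foldl_cons]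
    by_cases hx : x = "Bash"
    · subst hx
      by_cases hr : r + 1 = (3 : Int)
      · rw [if_pos (by simp), if_pos (by simp [hr]), ih]
        simp only [pvFA, if_pos (by simp : (("Bash":String) == "Bash") = true),
          if_pos (by simp [hr] : ((r + 1 == (3:Int))) = true)]
        ring
      · rw [if_pos (by simp), if_neg (by simp [hr]), ih]
        simp [pvFA, hr]
    · rw [if_neg (by simp [hx]), ih]
      simp [pvFA, hx]

theorem pvFA_head_not_bash : ∀ (rest : List String) (r : Int),
    (∀ y, rest.head? = some y → y ≠ "Bash") → pvFA rest r = pvFA rest 0 := by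
  intro rest r h
  cases rest with
  | nil => rfl
  | cons x xs =>
    have hx : x ≠ "Bash" := h x rfl
    simp [pvFA, hx]

theorem pvFA_replicate : ∀ (m : Nat) (rest : List String) (r : Int),
    (∀ y, rest.head? = some y → y ≠ "Bash") →
    pvFA (List.replicate m "Bash" ++ rest) r
      = (if r < 3 ∧ (3 : Int) ≤ r + m then 1 else 0) + pvFA rest 0 := by
  intro m
  induction m with
  | zero =>
    intro rest r h
    have : ¬ (r < 3 ∧ (3 : Int) ≤ r + (0 : Nat)) := by push_cast; omega
    simp [pvFA_head_not_bash rest r h]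
  | succ n ih =>
    intro rest r h
    have hrep : List.replicate (n + 1) "Bash" ++ rest = "Bash" :: (List.replicate n "Bash" ++ rest) := by
      simp [List.replicate_succ]
    rw [hrep]
    rw [show pvFA ("Bash" :: (List.replicate n "Bash" ++ rest)) r
        = (if ((r + 1 : Int) == 3) = true then 1 else 0) + pvFA (List.replicate n "Bash" ++ rest) (r + 1) from by
      simp [pvFA]]
    rw [ih rest (r + 1) h]
    simp only [beq_iff_eq]
    generalize pvFA rest 0 = F
    push_cast
    split_ifs <;> omega

theorem pvRunLen_decomp : ∀ (xs : List String),
    List.replicate (pvRunLen xs) "Bash" ++ xs.drop (pvRunLen xs) = xs := by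
  intro xs
  induction xs with
  | nil => rfl
  | cons x t ih =>
    by_cases hx : x = "Bash"
    · subst hx
      simp [pvRunLen, List.replicate_succ, ih]
    · simp [pvRunLen, hx]

theorem pvRunLen_drop_head : ∀ (xs : List String) (y : String),
    (xs.drop (pvRunLen xs)).head? = some y → y ≠ "Bash" := by
  intro xs
  induction xs with
  | nil => intro y h; simp at h
  | cons x t ih =>
    intro y
    by_cases hx : x = "Bash"
    · subst hx
      simpa [pvRunLen] using ih y
    · intro h hy
      simp [pvRunLen, hx] at h
      exact hx (h ▸ hy ▸ rfl)

theorem pvHits_eq (seq : List String) :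
    count_consecutive_runs seq (fun t => t == "Bash") 3 = pvCascadeHits seq := by
  induction seq using pvCascadeHits.induct with
  | case1 => simp [count_consecutive_runs, pvCascadeHits]
  | case2 x xs hx ih =>
    have hx' : x = "Bash" := by simpa using hx
    subst hx'
    unfold count_consecutive_runs at ih ⊢
    rw [pvFold_eq_FA]
    rw [pvFold_eq_FA] at ih
    have hdec := pvRunLen_decomp ("Bash" :: xs)
    have hhead := pvRunLen_drop_head ("Bash" :: xs)
    rw [pvCascadeHits]
    simp only [if_pos (by simp : (("Bash" : String) == "Bash") = true)]
    conv_lhs => rw [← hdec]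
    rw [pvFA_replicate _ _ _ hhead]
    rw [← ih]
    generalize pvFA (("Bash" :: xs).drop (pvRunLen ("Bash" :: xs))) 0 = F
    generalize pvRunLen ("Bash" :: xs) = k
    split_ifs with h1 h2 <;> omega
  | case3 x xs hx ih =>
    have hx' : x ≠ "Bash" := by simpa using hx
    unfold count_consecutive_runs at ih ⊢
    rw [pvFold_eq_FA] at ih ⊢
    rw [pvCascadeHits]
    rw [if_neg hx]
    rw [← ih]
    simp [pvFA, hx']

theorem pvFoldl_add_init (l : List Int) : ∀ (a : Int), l.foldl (· + ·) a = a + l.foldl (· + ·) 0 := by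
  induction l with
  | nil => intro a; simp
  | cons x t ih =>
    intro a
    simp only [List.foldl_cons]
    rw [ih (a + x), ih (0 + x)]
    ring

theorem pvOuter (seqs : List (List String)) : ∀ (v s : Int),
    seqs.foldl (fun (acc : Int × Int) seq =>
      let hits := count_consecutive_runs seq (fun t => t == "Bash") 3
      if hits ≠ 0 then (acc.1 + hits, acc.2 + 1) else acc) (v, s)
    = (v + (seqs.map pvCascadeHits).foldl (· + ·) 0,
       s + (((seqs.map pvCascadeHits).filter (fun h => h ≠ 0)).length : Int)) := by
  induction seqs with
  | nil => intro v s; simp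
  | cons seq rest ih =>
    intro v s
    simp only [List.foldl_cons, List.map_cons, List.filter_cons]
    rw [pvHits_eq]
    by_cases h : pvCascadeHits seq = 0
    · simp only [h]
      rw [if_neg (by simp), ih]
      simp
    · rw [if_pos (by simpa using h), ih]
      simp only [if_pos (by simpa using h : (decide ¬pvCascadeHits seq = 0) = true)]
      rw [pvFoldl_add_init _ (0 + pvCascadeHits seq)]
      simp only [Prod.mk.injEq, List.length_cons]
      constructor
      · ring
      · push_cast; ring

-- ===== VERDICT (by name: the statement is the Claim_ definition above) =====
theorem detect_error_cascade_py_spec : Claim_equal_detect_error_cascade_py := by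
  intro sequences _
  unfold Spec_detect_error_cascade_py detect_error_cascade_py detect_error_cascade_py_alt
  rw [pvOuter]
  simp
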